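-- pv_equiv track=rewrite | github.com/gerardroche/sublime-color-scheme-unit | plugin.py | _generate_assertions
-- ===== SOURCE A (Python) =====
-- def _generate_assertions(styles, comment_start, comment_end):
--     line_styles_count = len(styles)
--     repeat_count = 0
--     indent_count = 0
--     prev_style = None
--     assertions = []
--     for i, style in enumerate(styles):
--         if style == prev_style:
--             repeat_count += 1
--         else:
--             if prev_style is not None:
--                 assertions.append((indent_count * ' ') + ('^' * repeat_count) + ' ' + prev_style)
--                 indent_count += repeat_count
--                 repeat_count = 1
--             else:
--                 repeat_count += 1
--         prev_style = style
--         if line_styles_count == i + 1: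
--             assertions.append((indent_count * ' ') + ('^' * repeat_count) + ' ' + prev_style)
--
--     assertions_str = ''
--     for assertion in assertions:
--         assertion = assertion[len(comment_start):]
--         if assertion.lstrip(' ').startswith('^') and assertion.strip(' ^') != '':
--             assertions_str += comment_start + assertion + comment_end + '\n'
--
--     return assertions_str.rstrip('\n')
-- ===== SOURCE B (Python) =====
-- def _generate_assertions(styles, comment_start, comment_end):
--     n = len(styles)
--     starts = [i for i in range(n) if i == 0 or styles[i] != styles[i - 1]]
--     ends = starts[1:] + [n]
--     lines = [' ' * s + '^' * (e - s) + ' ' + styles[s] for s, e in zip(starts, ends)]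
--     tails = [line[len(comment_start):] for line in lines]
--     kept = [comment_start + t + comment_end + '\n' for t in tails
--             if t.lstrip(' ').startswith('^') and t.strip(' ^') != '']
--     return ''.join(kept).rstrip('\n')
-- ===== Notes on version B (the rewrite author's own statement) =====
-- stated objective: idiomatic
-- what changed: Replaced A's prev_style/repeat_count run-length state machine with its first/last-element special cases by directly computing the run boundary indices with a comprehension (each run's indent is simply its start index) and rendering/filtering the assertion lines with comprehensions joined at the end.
import Mathlib
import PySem

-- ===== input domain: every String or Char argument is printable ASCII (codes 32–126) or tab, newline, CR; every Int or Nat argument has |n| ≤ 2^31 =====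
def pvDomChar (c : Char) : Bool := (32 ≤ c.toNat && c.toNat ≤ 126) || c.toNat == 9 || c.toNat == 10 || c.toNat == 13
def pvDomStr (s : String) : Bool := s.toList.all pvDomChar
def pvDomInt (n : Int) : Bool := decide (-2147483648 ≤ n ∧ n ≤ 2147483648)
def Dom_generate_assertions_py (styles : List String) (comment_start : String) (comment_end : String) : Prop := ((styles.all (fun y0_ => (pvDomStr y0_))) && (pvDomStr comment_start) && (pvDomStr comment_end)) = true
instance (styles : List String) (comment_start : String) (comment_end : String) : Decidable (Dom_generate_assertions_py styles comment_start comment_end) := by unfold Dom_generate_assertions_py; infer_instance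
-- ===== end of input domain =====

-- B replaces A's prev/repeat run-length state machine (with its first/last-element special
-- cases) by computing the run boundary indices directly and rendering each run with a
-- comprehension-style second pass; objective: idiomatic, same cost.

-- shared hand ports of str methods PySem lacks in chars form (exact on all inputs):
-- s.lstrip(' ')  — drop leading space characters only
def pvLstripSpace (cs : List Char) : List Char := cs.dropWhile (fun c => c == ' ')
-- s.rstrip('\n') — drop trailing newline characters only
def pvRstripNL (cs : List Char) : List Char := (cs.reverse.dropWhile (fun c => c == '\n')).reverse
-- the filter both Pythons apply to a line already cut past comment_start:
-- t.lstrip(' ').startswith('^') and t.strip(' ^') != ''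
def pvKeepTest (t : List Char) : Bool :=
  PySem.Chars.startswith (pvLstripSpace t) ['^'] && (PySem.Chars.stripChars t [' ', '^'] != [])

-- ===== PORT A =====
-- loop body of A's first for-loop; state = (repeat_count, indent_count, prev_style, assertions)
def pvStepA (n : Nat) (s : Nat × Nat × Option (List Char) × List (List Char))
    (iv : Int × List Char) : Nat × Nat × Option (List Char) × List (List Char) :=
  match s, iv with
  | (rep, ind, prev, acc), (i, style) =>
    match (if prev = some style then (rep + 1, ind, acc)
           else match prev with
             | some pv => (1, ind + rep,
                 acc ++ [List.replicate ind ' ' ++ List.replicate rep '^' ++ ' ' :: pv])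
             | none => (rep + 1, ind, acc)) with
    | (rep', ind', acc') =>
      (rep', ind', some style,
        if (n : Int) = i + 1 then
          acc' ++ [List.replicate ind' ' ' ++ List.replicate rep' '^' ++ ' ' :: style]
        else acc')

def generate_assertions_py (styles : List String) (comment_start : String) (comment_end : String) : String :=
  let sts := styles.map String.toList
  let n := sts.length
  let assertions := ((PySem.List.enumerate sts 0).foldl (pvStepA n) (0, 0, none, [])).2.2.2
  let res := assertions.foldl (fun acc a =>
      let t := PySem.List.slice a (some (PySem.List.len comment_start.toList)) none
      if pvKeepTest t then
        acc ++ comment_start.toList ++ t ++ comment_end.toList ++ ['\n']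
      else acc) []
  String.ofList (pvRstripNL res)

-- ===== PORT B =====
-- starts = [i for i in range(n) if i == 0 or styles[i] != styles[i-1]]
def pvStartsB (sts : List (List Char)) : List Nat :=
  (List.range sts.length).filter (fun i => i == 0 || !(sts.getD i [] == sts.getD (i - 1) []))

def generate_assertions_py_alt (styles : List String) (comment_start : String) (comment_end : String) : String :=
  let sts := styles.map String.toList
  let n := sts.length
  let starts := pvStartsB sts
  let ends := starts.drop 1 ++ [n]
  let lines := (starts.zip ends).map (fun se =>
      List.replicate se.1 ' ' ++ List.replicate (se.2 - se.1) '^' ++ ' ' :: sts.getD se.1 [])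
  let tails := lines.map (fun l => l.drop comment_start.toList.length)
  let kept := (tails.filter pvKeepTest).map
      (fun t => comment_start.toList ++ t ++ comment_end.toList ++ ['\n'])
  String.ofList (pvRstripNL kept.flatten)

-- ===== PRECONDITION & SPEC =====
def Spec_generate_assertions_py (styles : List String) (comment_start : String) (comment_end : String) (out : String) : Prop := out = generate_assertions_py_alt styles comment_start comment_end
instance (styles : List String) (comment_start : String) (comment_end : String) (out : String) : Decidable (Spec_generate_assertions_py styles comment_start comment_end out) := by unfold Spec_generate_assertions_py; infer_instance

-- ===== CLAIM (what is proved, stated in full; the proofs are below) =====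
def Claim_equal_generate_assertions_py : Prop := ∀ (styles : List String) (comment_start : String) (comment_end : String), Dom_generate_assertions_py styles comment_start comment_end → Spec_generate_assertions_py styles comment_start comment_end (generate_assertions_py styles comment_start comment_end)

-- ===== LEMMAS AND PROOFS =====

-- a run descriptor: (indent, count, style)
def pvMkLine (r : Nat × Nat × List Char) : List Char :=
  List.replicate r.1 ' ' ++ List.replicate r.2.1 '^' ++ ' ' :: r.2.2

-- the runs of (replicate rep p ++ ys), indents starting at ind
def pvRunsFrom (ind : Nat) (p : List Char) (rep : Nat) : List (List Char) → List (Nat × Nat × List Char)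
  | [] => [(ind, rep, p)]
  | y :: t => if y = p then pvRunsFrom ind p (rep + 1) t else (ind, rep, p) :: pvRunsFrom (ind + rep) y 1 t

def pvRunsOfFrom (c : Nat) : List (List Char) → List (Nat × Nat × List Char)
  | [] => []
  | x :: t => pvRunsFrom c x 1 t

lemma pvRunsFrom_replicate (c : Nat) (p : List Char) (m : Nat) :
    ∀ rep, pvRunsFrom c p rep (List.replicate m p) = [(c, rep + m, p)] := by
  induction m with
  | zero => intro rep; simp [pvRunsFrom]
  | succ m ih =>
      intro rep
      rw [List.replicate_succ]
      rw [show pvRunsFrom c p rep (p :: List.replicate m p)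
            = pvRunsFrom c p (rep + 1) (List.replicate m p) from by simp [pvRunsFrom]]
      rw [ih]
      have h1 : rep + 1 + m = rep + (m + 1) := by omega
      rw [h1]

lemma pvRunsFrom_replicate_append (c : Nat) (p y : List Char) (u : List (List Char))
    (hy : y ≠ p) (m : Nat) :
    ∀ rep, pvRunsFrom c p rep (List.replicate m p ++ y :: u)
      = (c, rep + m, p) :: pvRunsFrom (c + (rep + m)) y 1 u := by
  induction m with
  | zero => intro rep; simp [pvRunsFrom, hy]
  | succ m ih =>
      intro rep
      rw [List.replicate_succ, List.cons_append]
      rw [show pvRunsFrom c p rep (p :: (List.replicate m p ++ y :: u))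
            = pvRunsFrom c p (rep + 1) (List.replicate m p ++ y :: u) from by simp [pvRunsFrom]]
      rw [ih]
      have h1 : rep + 1 + m = rep + (m + 1) := by omega
      rw [h1]

-- ---------- A side ----------

lemma pvA_loop (n : Nat) : ∀ (ys : List (List Char)) (i : Int) (rep ind : Nat)
    (p : List Char) (acc : List (List Char)), ys ≠ [] → i + ys.length = n →
    ((PySem.List.enumerate ys i).foldl (pvStepA n) (rep, ind, some p, acc)).2.2.2
      = acc ++ (pvRunsFrom ind p rep ys).map pvMkLine := by
  intro ys
  induction ys with
  | nil => intro _ _ _ _ _ h _; exact absurd rfl h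
  | cons y t ih =>
      intro i rep ind p acc _ hlen
      rw [show (y :: t).length = t.length + 1 from by simp] at hlen
      push_cast at hlen
      rw [PySem.List.enumerate_cons]
      by_cases hy : y = p
      · subst hy
        rcases eq_or_ne t [] with ht | htne
        · subst ht
          have hi : (n : Int) = i + 1 := by simp at hlen; omega
          simp [pvStepA, PySem.List.enumerate_nil, pvRunsFrom, pvMkLine, hi]
        · have htl : 0 < t.length := by
            cases t
            · exact absurd rfl htne
            · simp
          have hi : ¬ (n : Int) = i + 1 := by omega
          rw [List.foldl_cons]
          rw [show pvStepA n (rep, ind, some y, acc) (i, y) = (rep + 1, ind, some y, acc)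
                from by simp [pvStepA, hi]]
          rw [ih (i + 1) (rep + 1) ind y acc htne (by omega)]
          rw [show pvRunsFrom ind y rep (y :: t) = pvRunsFrom ind y (rep + 1) t
                from by simp [pvRunsFrom]]
      · have hpy : ¬ (p = y) := fun h => hy h.symm
        rcases eq_or_ne t [] with ht | htne
        · subst ht
          have hi : (n : Int) = i + 1 := by simp at hlen; omega
          simp [pvStepA, hpy, PySem.List.enumerate_nil, pvRunsFrom, hy, pvMkLine, hi]
        · have htl : 0 < t.length := by
            cases t
            · exact absurd rfl htne
            · simp
          have hi : ¬ (n : Int) = i + 1 := by omega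
          rw [List.foldl_cons]
          rw [show pvStepA n (rep, ind, some p, acc) (i, y)
                = (1, ind + rep, some y,
                    acc ++ [List.replicate ind ' ' ++ List.replicate rep '^' ++ ' ' :: p])
                from by simp [pvStepA, hpy, hi]]
          rw [ih (i + 1) 1 (ind + rep) y
              (acc ++ [List.replicate ind ' ' ++ List.replicate rep '^' ++ ' ' :: p])
              htne (by omega)]
          rw [show pvRunsFrom ind p rep (y :: t)
                = (ind, rep, p) :: pvRunsFrom (ind + rep) y 1 t from by simp [pvRunsFrom, hy]]
          simp [pvMkLine]

lemma pvA_assertions (sts : List (List Char)) :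
    ((PySem.List.enumerate sts 0).foldl (pvStepA sts.length) (0, 0, none, [])).2.2.2
      = (pvRunsOfFrom 0 sts).map pvMkLine := by
  rcases sts with _ | ⟨x, t⟩
  · simp [PySem.List.enumerate_nil, pvRunsOfFrom]
  · rw [PySem.List.enumerate_cons]
    rcases eq_or_ne t [] with ht | htne
    · subst ht
      simp [pvStepA, PySem.List.enumerate_nil, pvRunsOfFrom, pvRunsFrom, pvMkLine]
    · have htl : 0 < t.length := by
        cases t
        · exact absurd rfl htne
        · simp
      rw [List.foldl_cons]
      rw [show pvStepA (x :: t).length (0, 0, none, []) ((0 : Int), x)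
            = (1, 0, some x, []) from by simp [pvStepA, htne]]
      rw [pvA_loop (x :: t).length t (0 + 1) 1 0 x [] htne
          (by push_cast [List.length_cons]; omega)]
      simp [pvRunsOfFrom]

-- ---------- B side ----------

lemma pvGetD_left (k : Nat) (p : List Char) (ys : List (List Char)) (i : Nat) (h : i < k) :
    (List.replicate k p ++ ys).getD i [] = p := by
  have h1 : (List.replicate k p ++ ys)[i]? = some p := by
    rw [List.getElem?_append_left (by simpa using h)]
    simp [h]
  simp [List.getD_eq_getElem?_getD, h1]

lemma pvGetD_right (k : Nat) (p : List Char) (ys : List (List Char)) (j : Nat) :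
    (List.replicate k p ++ ys).getD (k + j) [] = ys.getD j [] := by
  have h1 : (List.replicate k p ++ ys)[k + j]? = ys[j]? := by
    rw [List.getElem?_append_right (by simp)]
    congr 1
    simp
  simp [List.getD_eq_getElem?_getD, h1]

lemma pvStartsB_nil : pvStartsB [] = [] := by
  simp [pvStartsB]

lemma pvStartsB_cons (y : List Char) (u : List (List Char)) :
    ∃ S₀, pvStartsB (y :: u) = 0 :: S₀ := by
  refine ⟨((List.range u.length).map Nat.succ).filter
      (fun i => i == 0 || !((y :: u).getD i [] == (y :: u).getD (i - 1) [])), ?_⟩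
  unfold pvStartsB
  rw [show (y :: u).length = u.length + 1 from by simp, List.range_succ_eq_map,
    List.filter_cons_of_pos (by simp)]

lemma pvStartsB_decomp (k : Nat) (hk : 1 ≤ k) (p : List Char) (ys : List (List Char))
    (hy : ∀ h, ys.head? = some h → h ≠ p) :
    pvStartsB (List.replicate k p ++ ys) = 0 :: (pvStartsB ys).map (k + ·) := by
  unfold pvStartsB
  rw [show (List.replicate k p ++ ys).length = k + ys.length from by simp, List.range_add]
  rw [List.filter_append]
  have h1 : (List.range k).filter
      (fun i => i == 0 || !((List.replicate k p ++ ys).getD i [] == (List.replicate k p ++ ys).getD (i - 1) [])) = [0] := by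
    obtain ⟨k', rfl⟩ : ∃ k', k = k' + 1 := ⟨k - 1, by omega⟩
    rw [List.range_succ_eq_map, List.filter_cons_of_pos (by simp)]
    rw [List.filter_map, List.filter_eq_nil_iff.mpr, List.map_nil]
    intro j hj
    have hj' : j < k' := List.mem_range.mp hj
    have e1 : (List.replicate (k' + 1) p ++ ys).getD (j + 1) [] = p :=
      pvGetD_left _ _ _ _ (by omega)
    have e2 : (List.replicate (k' + 1) p ++ ys).getD (j + 1 - 1) [] = p :=
      pvGetD_left _ _ _ _ (by omega)
    simp only [Function.comp_apply, Nat.succ_eq_add_one, e1, e2]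
    simp
  have h2 : ((List.range ys.length).map (k + ·)).filter
      (fun i => i == 0 || !((List.replicate k p ++ ys).getD i [] == (List.replicate k p ++ ys).getD (i - 1) [])) =
      ((List.range ys.length).filter
        (fun i => i == 0 || !(ys.getD i [] == ys.getD (i - 1) []))).map (k + ·) := by
    rw [List.filter_map]
    congr 1
    apply List.filter_congr
    intro j hj
    have hj' : j < ys.length := List.mem_range.mp hj
    have ekj : (List.replicate k p ++ ys).getD (k + j) [] = ys.getD j [] := pvGetD_right _ _ _ _
    simp only [Function.comp_apply]
    rcases Nat.eq_zero_or_pos j with rfl | hjpos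
    · obtain ⟨h, u, rfl⟩ : ∃ h u, ys = h :: u := by
        rcases ys with _ | ⟨h, u⟩
        · simp at hj'
        · exact ⟨h, u, rfl⟩
      have e2 : (List.replicate k p ++ h :: u).getD (k + 0 - 1) [] = p :=
        pvGetD_left _ _ _ _ (by omega)
      have hhp : h ≠ p := hy h (by simp)
      rw [ekj, e2]
      have hk0 : (k + 0 == 0) = false := by simp; omega
      rw [hk0]
      simp [hhp]
    · have e2 : (List.replicate k p ++ ys).getD (k + j - 1) [] = ys.getD (j - 1) [] := by
        rw [show k + j - 1 = k + (j - 1) from by omega, pvGetD_right]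
      rw [ekj, e2]
      have hk0 : (k + j == 0) = false := by simp; omega
      have hj0 : (j == 0) = false := by simp; omega
      rw [hk0, hj0]
  rw [h1, h2]
  rfl

lemma pvDropWhile_head {α : Type} (p : α → Bool) : ∀ (l : List α) (h : α),
    (l.dropWhile p).head? = some h → p h = false := by
  intro l
  induction l with
  | nil => intro h hh; simp [List.dropWhile] at hh
  | cons a t ih =>
      intro h hh
      rw [List.dropWhile_cons] at hh
      by_cases hp : p a
      · rw [if_pos hp] at hh
        exact ih h hh
      · rw [if_neg hp] at hh
        simp at hh
        subst hh
        simpa using hp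

lemma pvB_core (N : Nat) : ∀ (sts : List (List Char)), sts.length ≤ N → ∀ (c : Nat),
    ((pvStartsB sts).zip ((pvStartsB sts).drop 1 ++ [sts.length])).map
        (fun se => (se.1 + c, se.2 - se.1, sts.getD se.1 []))
      = pvRunsOfFrom c sts := by
  induction N with
  | zero =>
      intro sts hl c
      rcases sts with _ | ⟨a, b⟩
      · simp [pvStartsB_nil, pvRunsOfFrom]
      · simp at hl
  | succ N ih =>
      intro sts hl c
      rcases sts with _ | ⟨x, t⟩
      · simp [pvStartsB_nil, pvRunsOfFrom]
      have key : ∀ (k : Nat) (ys : List (List Char)), 1 ≤ k →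
          (∀ h, ys.head? = some h → h ≠ x) → ys.length ≤ N →
          ((pvStartsB (List.replicate k x ++ ys)).zip
              ((pvStartsB (List.replicate k x ++ ys)).drop 1 ++ [(List.replicate k x ++ ys).length])).map
            (fun se => (se.1 + c, se.2 - se.1, (List.replicate k x ++ ys).getD se.1 []))
          = pvRunsOfFrom c (List.replicate k x ++ ys) := by
        intro k ys hk1 hyh hylen
        have hrep : List.replicate k x = x :: List.replicate (k - 1) x := by
          conv_lhs => rw [show k = (k - 1) + 1 from by omega]
          rw [List.replicate_succ]
        have hg0 : (List.replicate k x ++ ys).getD 0 [] = x := pvGetD_left _ _ _ _ (by omega)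
        rw [pvStartsB_decomp k hk1 x ys hyh]
        rcases ys with _ | ⟨h, u⟩
        · rw [pvStartsB_nil]
          simp only [List.map_nil, List.drop_one, List.tail_cons, List.nil_append,
            List.zip_cons_cons, List.zip_nil_right, List.map_cons]
          rw [List.append_nil] at hg0
          rw [show (List.replicate k x ++ ([] : List (List Char))) = List.replicate k x
                from List.append_nil _]
          conv_rhs => rw [hrep]
          simp only [pvRunsOfFrom]
          rw [pvRunsFrom_replicate]
          rw [show 1 + (k - 1) = k from by omega]
          simp
          rw [hrep]
          simp
        · have hhx : h ≠ x := hyh h rfl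
          obtain ⟨S₀, hS⟩ := pvStartsB_cons h u
          have hS₀ : S₀ = (pvStartsB (h :: u)).drop 1 := by rw [hS]; simp
          have hn : (List.replicate k x ++ h :: u).length = k + (h :: u).length := by simp
          rw [hS, hn]
          simp only [List.map_cons, List.drop_one, List.tail_cons]
          rw [List.cons_append, List.zip_cons_cons, List.map_cons]
          rw [show ((k + 0 : Nat) :: S₀.map (k + ·)) = (0 :: S₀).map (k + ·) from by simp]
          rw [show S₀.map (k + ·) ++ [k + (h :: u).length]
                = (S₀ ++ [(h :: u).length]).map (k + ·) from by simp]
          rw [List.zip_map, List.map_map]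
          have hcong : ∀ se ∈ (0 :: S₀).zip (S₀ ++ [(h :: u).length]),
              ((fun se => (se.1 + c, se.2 - se.1, (List.replicate k x ++ h :: u).getD se.1 []))
                ∘ Prod.map (k + ·) (k + ·)) se
              = (fun se => (se.1 + (c + k), se.2 - se.1, (h :: u).getD se.1 [])) se := by
            intro se _
            simp only [Function.comp_apply, Prod.map]
            rw [pvGetD_right]
            simp only [Prod.mk.injEq]
            exact ⟨by omega, by omega, trivial⟩
          rw [List.map_congr_left hcong]
          rw [← hS, hS₀]
          rw [ih (h :: u) hylen (c + k)]
          conv_rhs => rw [hrep, List.cons_append]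
          simp only [pvRunsOfFrom]
          rw [pvRunsFrom_replicate_append c x h u hhx (k - 1) 1]
          rw [show 1 + (k - 1) = k from by omega]
          simp
          rw [List.getElem_append_left (by simp; omega)]
          simp
      have hsts : x :: t = List.replicate ((t.takeWhile (fun y => y == x)).length + 1) x
          ++ t.dropWhile (fun y => y == x) := by
        have hall : ∀ b ∈ t.takeWhile (fun y => y == x), b = x := by
          intro b hb
          have := List.mem_takeWhile_imp hb
          simpa using this
        have htake := List.eq_replicate_of_mem hall
        conv_lhs => rw [← List.takeWhile_append_dropWhile (p := fun y => y == x) (l := t)]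
        rw [List.replicate_succ, htake]
        simp
      have hyh : ∀ h, (t.dropWhile (fun y => y == x)).head? = some h → h ≠ x := by
        intro h hh heq
        have := pvDropWhile_head _ t h hh
        rw [heq] at this
        simp at this
      have hylen : (t.dropWhile (fun y => y == x)).length ≤ N := by
        have h1 := List.length_dropWhile_le (fun y => y == x) t
        have h2 : t.length ≤ N := by
          have := hl
          simp at this
          omega
        omega
      rw [hsts]
      exact key _ _ (by omega) hyh hylen

lemma pvB_lines0 (sts : List (List Char)) :
    ((pvStartsB sts).zip ((pvStartsB sts).drop 1 ++ [sts.length])).map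
        (fun se => List.replicate se.1 ' ' ++ List.replicate (se.2 - se.1) '^' ++ ' ' :: sts.getD se.1 [])
      = (pvRunsOfFrom 0 sts).map pvMkLine := by
  rw [← pvB_core sts.length sts le_rfl 0, List.map_map]
  apply List.map_congr_left
  intro se _
  simp [pvMkLine]

-- ---------- second pass ----------

lemma pvSecond (L : List (List Char)) (cs ce : List Char) :
    L.foldl (fun acc a =>
        if pvKeepTest (PySem.List.slice a (some (PySem.List.len cs)) none) then
          acc ++ cs ++ (PySem.List.slice a (some (PySem.List.len cs)) none) ++ ce ++ ['\n']
        else acc) []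
      = (((L.map (fun l => l.drop cs.length)).filter pvKeepTest).map
          (fun t => cs ++ t ++ ce ++ ['\n'])).flatten := by
  have hslice : ∀ a : List Char,
      PySem.List.slice a (some (PySem.List.len cs)) none = a.drop cs.length := by
    intro a
    rw [show PySem.List.len cs = ((cs.length : Nat) : Int) from by simp [PySem.List.len_eq]]
    exact PySem.List.slice_from_natCast a cs.length
  simp only [hslice, List.append_assoc]
  rw [PySem.List.foldl_if_eq_foldl_filter]
  rw [PySem.List.foldl_append_eq_flatMap]
  rw [List.filter_map]
  simp [List.map_map, List.flatMap_def, Function.comp_def]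

-- ---------- assembling ----------

theorem pv_main (styles : List String) (comment_start : String) (comment_end : String) :
    generate_assertions_py styles comment_start comment_end
      = generate_assertions_py_alt styles comment_start comment_end := by
  simp only [generate_assertions_py, generate_assertions_py_alt]
  rw [pvA_assertions (styles.map String.toList)]
  rw [pvB_lines0 (styles.map String.toList)]
  exact congrArg String.ofList (congrArg pvRstripNL
    (pvSecond ((pvRunsOfFrom 0 (styles.map String.toList)).map pvMkLine)
      comment_start.toList comment_end.toList))

-- ===== VERDICT (by name: the statement is the Claim_ definition above) =====
theorem generate_assertions_py_spec : Claim_equal_generate_assertions_py := by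
  intro styles cs ce _
  unfold Spec_generate_assertions_py
  exact pv_main styles cs ce
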